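-- pv_equiv track=rewrite | github.com/heffrey78/game_loop | src/game_loop/core/objects/object_integration.py | _assess_overall_object_status
-- ===== SOURCE A (Python) =====
-- from typing import Any
--
-- def _assess_overall_object_status(systems: dict[str, Any]) -> str:
--     """Assess overall object status from system information."""
--     error_count = sum(1 for system in systems.values() if "error" in system)
--     attention_needed = sum(
--         1 for system in systems.values() if system.get("needs_attention", False)
--     )
--
--     if error_count > 0:
--         return "error"
--     elif attention_needed > 0:
--         return "needs_attention"
--     else:
--         return "good"
-- ===== SOURCE B (Python) =====
-- from typing import Any
--
-- def _assess_overall_object_status(systems: dict[str, Any]) -> str: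
--     """Assess overall object status from system information."""
--     attention = False
--     for system in systems.values():
--         if "error" in system:
--             return "error"
--         attention = attention or system.get("needs_attention", False)
--     return "needs_attention" if attention else "good"
-- ===== Notes on version B (the rewrite author's own statement) =====
-- stated objective: simpler
-- what changed: Replaced the two counting comprehensions over systems.values() by a single traversal that returns "error" immediately on the first system containing "error" and otherwise accumulates one needs_attention flag.
import Mathlib
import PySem

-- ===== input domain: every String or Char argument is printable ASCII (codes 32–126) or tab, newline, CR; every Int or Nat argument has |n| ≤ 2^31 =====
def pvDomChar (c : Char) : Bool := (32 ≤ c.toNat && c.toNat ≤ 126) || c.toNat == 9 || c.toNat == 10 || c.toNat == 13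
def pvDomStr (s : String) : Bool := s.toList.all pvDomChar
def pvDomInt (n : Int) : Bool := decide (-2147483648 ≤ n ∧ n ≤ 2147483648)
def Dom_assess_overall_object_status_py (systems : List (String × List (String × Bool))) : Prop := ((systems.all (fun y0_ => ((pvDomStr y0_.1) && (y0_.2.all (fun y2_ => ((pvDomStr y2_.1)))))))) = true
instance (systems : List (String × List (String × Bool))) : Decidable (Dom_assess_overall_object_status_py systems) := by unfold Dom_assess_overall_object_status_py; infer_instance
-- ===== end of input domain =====

-- B replaces A's two counting passes by one early-exit traversal maintaining a single flag (simpler, same result).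

-- ===== PORT A =====
-- two counting folds over the dict's values, then the branch chain
def assess_overall_object_status_py (systems : List (String × List (String × Bool))) : String :=
  let vals := (PySem.Dict.ofList systems).values
  let error_count : Int :=
    vals.foldl (fun acc sys => if (PySem.Dict.ofList sys).contains "error" then acc + 1 else acc) 0
  let attention_needed : Int :=
    vals.foldl (fun acc sys => if (PySem.Dict.ofList sys).getD "needs_attention" false then acc + 1 else acc) 0
  if error_count > 0 then "error"
  else if attention_needed > 0 then "needs_attention"
  else "good"

-- ===== PORT B =====
-- the single loop of Source B: early return on "error", one boolean flag for attention
def assessAltGo : List (List (String × Bool)) → Bool → String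
  | [], attention => if attention then "needs_attention" else "good"
  | sys :: rest, attention =>
      if (PySem.Dict.ofList sys).contains "error" then "error"
      else assessAltGo rest (attention || (PySem.Dict.ofList sys).getD "needs_attention" false)

def assess_overall_object_status_py_alt (systems : List (String × List (String × Bool))) : String :=
  assessAltGo (PySem.Dict.ofList systems).values false

-- ===== PRECONDITION & SPEC =====
def Spec_assess_overall_object_status_py (systems : List (String × List (String × Bool))) (out : String) : Prop := out = assess_overall_object_status_py_alt systems
instance (systems : List (String × List (String × Bool))) (out : String) : Decidable (Spec_assess_overall_object_status_py systems out) := by unfold Spec_assess_overall_object_status_py; infer_instance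

-- ===== CLAIM (what is proved, stated in full; the proofs are below) =====
def Claim_equal_assess_overall_object_status_py : Prop := ∀ (systems : List (String × List (String × Bool))), Dom_assess_overall_object_status_py systems → Spec_assess_overall_object_status_py systems (assess_overall_object_status_py systems)

-- ===== LEMMAS AND PROOFS =====

-- a counting fold starting from a nonnegative accumulator is positive iff it started positive or some element satisfies the test
theorem count_fold_pos {α : Type} (q : α → Bool) :
    ∀ (xs : List α) (n : Int), 0 ≤ n →
      (0 < xs.foldl (fun acc x => if q x then acc + 1 else acc) n ↔ (0 < n ∨ xs.any q = true)) := by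
  intro xs
  induction xs with
  | nil => intro n hn; simp
  | cons x xs ih =>
    intro n hn
    simp only [List.foldl_cons, List.any_cons]
    by_cases hq : q x = true
    · rw [if_pos hq]
      rw [ih (n + 1) (by omega)]
      constructor
      · intro h; cases h with
        | inl h => exact Or.inr (by simp [hq])
        | inr h => exact Or.inr (by simp [h])
      · intro _; exact Or.inl (by omega)
    · rw [if_neg hq]
      rw [ih n hn]
      simp [hq]

-- the early-exit loop equals the "any error / flag-or-any attention" characterisation
theorem assessAltGo_eq :
    ∀ (xs : List (List (String × Bool))) (flag : Bool),
      assessAltGo xs flag =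
        if xs.any (fun sys => (PySem.Dict.ofList sys).contains "error") then "error"
        else if flag || xs.any (fun sys => (PySem.Dict.ofList sys).getD "needs_attention" false)
          then "needs_attention" else "good" := by
  intro xs
  induction xs with
  | nil => intro flag; simp [assessAltGo]
  | cons sys xs ih =>
    intro flag
    simp only [assessAltGo, List.any_cons]
    by_cases he : (PySem.Dict.ofList sys).contains "error" = true
    · simp [he]
    · simp only [he, Bool.false_or]
      rw [ih]
      by_cases ha : xs.any (fun sys => (PySem.Dict.ofList sys).contains "error") = true
      · simp [ha]
      · simp only [ha]
        by_cases hf : flag = true <;>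
          by_cases hs : (PySem.Dict.ofList sys).getD "needs_attention" false = true <;>
            simp [hf, hs, Bool.or_comm]

-- ===== VERDICT (by name: the statement is the Claim_ definition above) =====
theorem assess_overall_object_status_py_spec : Claim_equal_assess_overall_object_status_py := by
  intro systems _
  unfold Spec_assess_overall_object_status_py assess_overall_object_status_py assess_overall_object_status_py_alt
  rw [assessAltGo_eq]
  have h1 := count_fold_pos (fun sys => (PySem.Dict.ofList sys).contains "error")
    ((PySem.Dict.ofList systems).values) 0 le_rfl
  have h2 := count_fold_pos (fun sys => (PySem.Dict.ofList sys).getD "needs_attention" false)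
    ((PySem.Dict.ofList systems).values) 0 le_rfl
  simp only [lt_irrefl, false_or] at h1 h2
  simp only [gt_iff_lt, h1, h2, Bool.false_or]
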